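-- pv_equiv track=rewrite | github.com/rizen94/News-Intelligence-Public | api/services/domain_knowledge_service.py | _generate_science_tech_context
-- ===== SOURCE A (Python) =====
-- def _generate_science_tech_context(entities: list[str], timeframe: str) -> str:
--     """Generate science-tech-specific historical context"""
--     context_parts = []
--
--     if any(
--         "ai" in e.lower()
--         or "artificial intelligence" in e.lower()
--         or "machine learning" in e.lower()
--         for e in entities
--     ):
--         context_parts.append(
--             "AI development has accelerated rapidly with large language models, "
--             "raising both opportunities and concerns about capabilities and safety."
--         )
--
--     if any(
--         "openai" in e.lower() or "chatgpt" in e.lower() or "gpt" in e.lower() for e in entities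
--     ):
--         context_parts.append(
--             "The emergence of ChatGPT and similar systems has transformed "
--             "public awareness and adoption of AI technologies."
--         )
--
--     if any("cyber" in e.lower() or "security" in e.lower() for e in entities):
--         context_parts.append(
--             "Cybersecurity threats continue to evolve with state-sponsored "
--             "attacks, ransomware, and data breaches affecting organizations globally."
--         )
--
--     if any("quantum" in e.lower() for e in entities):
--         context_parts.append(
--             "Quantum computing development progresses toward practical applications, "
--             "with implications for cryptography and scientific computing."
--         )
--
--     return (
--         " ".join(context_parts)
--         if context_parts
--         else (
--             "Technology developments are rapidly evolving across AI, cloud computing, "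
--             "and cybersecurity with significant societal implications."
--         )
--     )
-- ===== SOURCE B (Python) =====
-- def _generate_science_tech_context(entities: list[str], timeframe: str) -> str:
--     ai_hit = gpt_hit = cyber_hit = quantum_hit = False
--     for e in entities:
--         le = e.lower()
--         ai_hit = ai_hit or "ai" in le or "artificial intelligence" in le or "machine learning" in le
--         gpt_hit = gpt_hit or "openai" in le or "chatgpt" in le or "gpt" in le
--         cyber_hit = cyber_hit or "cyber" in le or "security" in le
--         quantum_hit = quantum_hit or "quantum" in le
--     context_parts = []
--     if ai_hit:
--         context_parts.append(
--             "AI development has accelerated rapidly with large language models, "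
--             "raising both opportunities and concerns about capabilities and safety."
--         )
--     if gpt_hit:
--         context_parts.append(
--             "The emergence of ChatGPT and similar systems has transformed "
--             "public awareness and adoption of AI technologies."
--         )
--     if cyber_hit:
--         context_parts.append(
--             "Cybersecurity threats continue to evolve with state-sponsored "
--             "attacks, ransomware, and data breaches affecting organizations globally."
--         )
--     if quantum_hit:
--         context_parts.append(
--             "Quantum computing development progresses toward practical applications, "
--             "with implications for cryptography and scientific computing."
--         )
--     return (
--         " ".join(context_parts)
--         if context_parts
--         else (
--             "Technology developments are rapidly evolving across AI, cloud computing, "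
--             "and cybersecurity with significant societal implications."
--         )
--     )
-- ===== Notes on version B (the rewrite author's own statement) =====
-- stated objective: alternative
-- what changed: Replaces four independent any()-scans over entities (each lowercasing every element) with a single accumulating pass that lowercases each element once and ORs four flags, then assembles the parts from the flags.
import Mathlib
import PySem

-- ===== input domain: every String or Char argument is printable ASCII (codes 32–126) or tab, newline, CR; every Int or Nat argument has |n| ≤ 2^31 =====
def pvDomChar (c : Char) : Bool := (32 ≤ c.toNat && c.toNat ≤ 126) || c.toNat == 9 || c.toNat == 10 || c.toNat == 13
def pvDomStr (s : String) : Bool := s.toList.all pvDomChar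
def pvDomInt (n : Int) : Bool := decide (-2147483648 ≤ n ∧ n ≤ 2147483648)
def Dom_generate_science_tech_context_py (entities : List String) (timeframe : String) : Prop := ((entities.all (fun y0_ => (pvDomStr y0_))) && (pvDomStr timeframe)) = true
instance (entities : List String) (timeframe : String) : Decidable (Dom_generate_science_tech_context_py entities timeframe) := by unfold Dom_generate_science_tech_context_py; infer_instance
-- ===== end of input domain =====

-- B replaces A's four independent any()-scans with one accumulating pass that lowercases each
-- element once and ORs four flags (objective: alternative decomposition, same cost class).

-- the four fixed context sentences and the default
def pvMsgAI : String :=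
  "AI development has accelerated rapidly with large language models, raising both opportunities and concerns about capabilities and safety."
def pvMsgGPT : String :=
  "The emergence of ChatGPT and similar systems has transformed public awareness and adoption of AI technologies."
def pvMsgCyber : String :=
  "Cybersecurity threats continue to evolve with state-sponsored attacks, ransomware, and data breaches affecting organizations globally."
def pvMsgQuantum : String :=
  "Quantum computing development progresses toward practical applications, with implications for cryptography and scientific computing."
def pvMsgDefault : String :=
  "Technology developments are rapidly evolving across AI, cloud computing, and cybersecurity with significant societal implications."

-- ===== PORT A =====
def generate_science_tech_context_py (entities : List String) (timeframe : String) : String :=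
  let context_parts : List String := []
  let context_parts :=
    if entities.any (fun e =>
        PySem.Str.isIn "ai" (PySem.Str.lower e) ||
        PySem.Str.isIn "artificial intelligence" (PySem.Str.lower e) ||
        PySem.Str.isIn "machine learning" (PySem.Str.lower e))
    then context_parts ++ [pvMsgAI] else context_parts
  let context_parts :=
    if entities.any (fun e =>
        PySem.Str.isIn "openai" (PySem.Str.lower e) ||
        PySem.Str.isIn "chatgpt" (PySem.Str.lower e) ||
        PySem.Str.isIn "gpt" (PySem.Str.lower e))
    then context_parts ++ [pvMsgGPT] else context_parts
  let context_parts :=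
    if entities.any (fun e =>
        PySem.Str.isIn "cyber" (PySem.Str.lower e) ||
        PySem.Str.isIn "security" (PySem.Str.lower e))
    then context_parts ++ [pvMsgCyber] else context_parts
  let context_parts :=
    if entities.any (fun e => PySem.Str.isIn "quantum" (PySem.Str.lower e))
    then context_parts ++ [pvMsgQuantum] else context_parts
  if context_parts ≠ [] then PySem.Str.join " " context_parts else pvMsgDefault

-- ===== PORT B =====
def generate_science_tech_context_py_alt (entities : List String) (timeframe : String) : String :=
  let flags : Bool × Bool × Bool × Bool :=
    entities.foldl (fun f e =>
      let le := PySem.Str.lower e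
      (f.1 || PySem.Str.isIn "ai" le || PySem.Str.isIn "artificial intelligence" le ||
         PySem.Str.isIn "machine learning" le,
       f.2.1 || PySem.Str.isIn "openai" le || PySem.Str.isIn "chatgpt" le ||
         PySem.Str.isIn "gpt" le,
       f.2.2.1 || PySem.Str.isIn "cyber" le || PySem.Str.isIn "security" le,
       f.2.2.2 || PySem.Str.isIn "quantum" le)) (false, false, false, false)
  let context_parts : List String :=
    (if flags.1 then [pvMsgAI] else []) ++
    (if flags.2.1 then [pvMsgGPT] else []) ++
    (if flags.2.2.1 then [pvMsgCyber] else []) ++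
    (if flags.2.2.2 then [pvMsgQuantum] else [])
  if context_parts ≠ [] then PySem.Str.join " " context_parts else pvMsgDefault

-- ===== PRECONDITION & SPEC =====
def Spec_generate_science_tech_context_py (entities : List String) (timeframe : String) (out : String) : Prop := out = generate_science_tech_context_py_alt entities timeframe
instance (entities : List String) (timeframe : String) (out : String) : Decidable (Spec_generate_science_tech_context_py entities timeframe out) := by unfold Spec_generate_science_tech_context_py; infer_instance

-- ===== CLAIM (what is proved, stated in full; the proofs are below) =====
def Claim_equal_generate_science_tech_context_py : Prop := ∀ (entities : List String) (timeframe : String), Dom_generate_science_tech_context_py entities timeframe → Spec_generate_science_tech_context_py entities timeframe (generate_science_tech_context_py entities timeframe)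

-- ===== LEMMAS AND PROOFS =====

-- B's fold computes the four any()-scans, ORed onto the accumulator
theorem pv_fold_flags (l : List String) (a b c d : Bool) :
    l.foldl (fun (f : Bool × Bool × Bool × Bool) e =>
      let le := PySem.Str.lower e
      (f.1 || PySem.Str.isIn "ai" le || PySem.Str.isIn "artificial intelligence" le ||
         PySem.Str.isIn "machine learning" le,
       f.2.1 || PySem.Str.isIn "openai" le || PySem.Str.isIn "chatgpt" le ||
         PySem.Str.isIn "gpt" le,
       f.2.2.1 || PySem.Str.isIn "cyber" le || PySem.Str.isIn "security" le,
       f.2.2.2 || PySem.Str.isIn "quantum" le)) (a, b, c, d) =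
    (a || l.any (fun e =>
        PySem.Str.isIn "ai" (PySem.Str.lower e) ||
        PySem.Str.isIn "artificial intelligence" (PySem.Str.lower e) ||
        PySem.Str.isIn "machine learning" (PySem.Str.lower e)),
     b || l.any (fun e =>
        PySem.Str.isIn "openai" (PySem.Str.lower e) ||
        PySem.Str.isIn "chatgpt" (PySem.Str.lower e) ||
        PySem.Str.isIn "gpt" (PySem.Str.lower e)),
     c || l.any (fun e =>
        PySem.Str.isIn "cyber" (PySem.Str.lower e) ||
        PySem.Str.isIn "security" (PySem.Str.lower e)),
     d || l.any (fun e => PySem.Str.isIn "quantum" (PySem.Str.lower e))) := by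
  induction l generalizing a b c d with
  | nil => simp
  | cons x xs ih =>
      simp only [List.foldl_cons, List.any_cons, ih, Prod.mk.injEq]
      refine ⟨?_, ?_, ?_, ?_⟩
      · cases a <;> simp [Bool.or_assoc]
      · cases b <;> simp [Bool.or_assoc]
      · cases c <;> simp [Bool.or_assoc]
      · cases d <;> simp [Bool.or_assoc]

-- ===== VERDICT (by name: the statement is the Claim_ definition above) =====
theorem generate_science_tech_context_py_spec : Claim_equal_generate_science_tech_context_py := by
  intro entities timeframe _
  show generate_science_tech_context_py entities timeframe =
    generate_science_tech_context_py_alt entities timeframe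
  unfold generate_science_tech_context_py generate_science_tech_context_py_alt
  rw [pv_fold_flags]
  rcases Bool.eq_false_or_eq_true (entities.any (fun e =>
        PySem.Str.isIn "ai" (PySem.Str.lower e) ||
        PySem.Str.isIn "artificial intelligence" (PySem.Str.lower e) ||
        PySem.Str.isIn "machine learning" (PySem.Str.lower e))) with h1 | h1 <;>
  rcases Bool.eq_false_or_eq_true (entities.any (fun e =>
        PySem.Str.isIn "openai" (PySem.Str.lower e) ||
        PySem.Str.isIn "chatgpt" (PySem.Str.lower e) ||
        PySem.Str.isIn "gpt" (PySem.Str.lower e))) with h2 | h2 <;>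
  rcases Bool.eq_false_or_eq_true (entities.any (fun e =>
        PySem.Str.isIn "cyber" (PySem.Str.lower e) ||
        PySem.Str.isIn "security" (PySem.Str.lower e))) with h3 | h3 <;>
  rcases Bool.eq_false_or_eq_true (entities.any (fun e =>
        PySem.Str.isIn "quantum" (PySem.Str.lower e))) with h4 | h4 <;>
  simp only [h1, h2, h3, h4] <;> rfl
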